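-- pv_equiv track=rewrite | github.com/meng-luo/zhenxun_plugin_chatinter | chatinter/lifecycle.py | _compose_sections
-- ===== SOURCE A (Python) =====
-- def _compose_sections(sections: dict[str, list[str]]) -> str:
--     ordered = []
--     for tag in (
--         "qq_context",
--         "history_context",
--         "history",
--         "current_message_layers",
--         "user_state",
--         "retrieval_knowledge",
--     ):
--         section = sections.get(tag)
--         if section:
--             ordered.extend(section)
--     for tag, section in sections.items():
--         if tag in {
--             "qq_context",
--             "history_context",
--             "history",
--             "current_message_layers",
--             "user_state",
--             "retrieval_knowledge",
--         }:
--             continue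
--         ordered.extend(section)
--     return "\n".join(ordered)
-- ===== SOURCE B (Python) =====
-- def _compose_sections(sections: dict[str, list[str]]) -> str:
--     rank = {
--         "qq_context": 0,
--         "history_context": 1,
--         "history": 2,
--         "current_message_layers": 3,
--         "user_state": 4,
--         "retrieval_knowledge": 5,
--     }
--     result = []
--     for _tag, section in sorted(sections.items(), key=lambda kv: rank.get(kv[0], 6)):
--         result += section
--     return "\n".join(result)
-- ===== Notes on version B (the rewrite author's own statement) =====
-- stated objective: idiomatic
-- what changed: A's two explicit passes (a fixed priority-tag loop of dict.get lookups followed by a skip-the-priority-tags items loop) are replaced by one stable sort of sections.items() under a rank dictionary (unknown tags share sentinel rank 6, so insertion order is preserved among them) and a single extend pass.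
import Mathlib
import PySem

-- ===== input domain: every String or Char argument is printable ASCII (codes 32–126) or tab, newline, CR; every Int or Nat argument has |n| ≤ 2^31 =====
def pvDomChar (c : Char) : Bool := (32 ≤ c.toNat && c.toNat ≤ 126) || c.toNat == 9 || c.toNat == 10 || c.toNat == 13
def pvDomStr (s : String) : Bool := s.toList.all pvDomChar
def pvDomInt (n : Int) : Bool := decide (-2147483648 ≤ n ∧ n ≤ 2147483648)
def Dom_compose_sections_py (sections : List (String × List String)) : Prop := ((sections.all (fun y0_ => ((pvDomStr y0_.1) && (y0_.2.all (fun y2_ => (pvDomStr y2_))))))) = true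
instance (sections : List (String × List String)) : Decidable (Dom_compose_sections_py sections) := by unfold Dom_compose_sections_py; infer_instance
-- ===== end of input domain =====

-- B replaces A's two explicit passes (fixed priority loop + skip loop) by one stable sort of the
-- items under a rank dictionary followed by a single extend pass; objective: simpler/idiomatic.

-- ===== PORT A =====
def pvPrioTags : List String :=
  ["qq_context", "history_context", "history", "current_message_layers", "user_state",
   "retrieval_knowledge"]

def compose_sections_py (sections : List (String × List String)) : String :=
  let ordered : List String := pvPrioTags.foldl (fun acc tag =>
    match (PySem.Dict.mk sections).get? tag with
    | some sec => if sec ≠ [] then acc ++ sec else acc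
    | none => acc) []
  let ordered := sections.foldl (fun acc kv =>
    if kv.1 ∈ pvPrioTags then acc else acc ++ kv.2) ordered
  PySem.Str.join "\n" ordered

-- ===== PORT B =====
def pvRank : PySem.Dict String Int :=
  PySem.Dict.ofList [("qq_context", 0), ("history_context", 1), ("history", 2),
    ("current_message_layers", 3), ("user_state", 4), ("retrieval_knowledge", 5)]

def compose_sections_py_alt (sections : List (String × List String)) : String :=
  let result := (PySem.List.sorted sections (fun kv => pvRank.getD kv.1 6) false).foldl
      (fun acc kv => acc ++ kv.2) ([] : List String)
  PySem.Str.join "\n" result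

-- ===== PRECONDITION & SPEC =====
-- Pre_ excludes association lists with duplicate tags, which cannot arise from a Python dict
-- (the parameter's type): on them "the dict's items" is ambiguous and A's get-once-then-skip-all
-- reading differs from B's iterate-all reading.
def Pre_compose_sections_py (sections : List (String × List String)) : Prop :=
  (sections.map Prod.fst).Nodup
instance (sections : List (String × List String)) : Decidable (Pre_compose_sections_py sections) := by
  unfold Pre_compose_sections_py; infer_instance

def pvWitness_compose_sections_py : (List (String × List String)) :=
  [("history", ["h1", "h2"]), ("foo", ["f"]), ("qq_context", ["q"]), ("bar", [])]

def Spec_compose_sections_py (sections : List (String × List String)) (out : String) : Prop := out = compose_sections_py_alt sections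
instance (sections : List (String × List String)) (out : String) : Decidable (Spec_compose_sections_py sections out) := by unfold Spec_compose_sections_py; infer_instance

-- ===== CLAIM (what is proved, stated in full; the proofs are below) =====
def Claim_equal_compose_sections_py : Prop := ∀ (sections : List (String × List String)), Dom_compose_sections_py sections → Pre_compose_sections_py sections → Spec_compose_sections_py sections (compose_sections_py sections)

-- ===== LEMMAS AND PROOFS =====

-- the flattened contents of the (unique) entry of `sections` carrying tag `t`, [] if absent
def pvFlat (t : String) (sections : List (String × List String)) : List String :=
  (sections.filter (fun kv => kv.1 == t)).flatMap (fun kv => kv.2)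

-- bucket i of a stable sort by an Int-valued key
def pvBk {α : Type} (key : α → Int) (i : Int) (xs : List α) : List α :=
  xs.filter (fun x => key x == i)

lemma pv_mem_bk {α : Type} {key : α → Int} {i : Int} {xs : List α} {y : α}
    (h : y ∈ pvBk key i xs) : key y = i := by
  simp only [pvBk, List.mem_filter, beq_iff_eq] at h; exact h.2

lemma pvBk_append_singleton {α : Type} (key : α → Int) (i : Int) (xs : List α) (x : α) :
    pvBk key i (xs ++ [x]) = pvBk key i xs ++ (if key x == i then [x] else []) := by
  simp [pvBk, List.filter_append, List.filter_cons]

lemma pv_insertBy_skip {α : Type} (before : α → α → Bool) (x : α) (ys zs : List α)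
    (h : ∀ y ∈ ys, before x y = false) :
    PySem.List.insertBy before x (ys ++ zs) = ys ++ PySem.List.insertBy before x zs := by
  induction ys with
  | nil => rfl
  | cons y ys ih =>
    simp only [List.cons_append, PySem.List.insertBy, h y (by simp), Bool.false_eq_true,
      if_false, List.cons.injEq, true_and]
    exact ih (fun y hy => h y (by simp [hy]))

lemma pv_insertBy_front {α : Type} (before : α → α → Bool) (x : α) (ys : List α)
    (h : ∀ y ∈ ys, before x y = true) :
    PySem.List.insertBy before x ys = x :: ys := by
  cases ys with
  | nil => rfl
  | cons y ys => simp [PySem.List.insertBy, h y (by simp)]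

lemma pv_insert_at {α : Type} (key : α → Int) (x : α) (ls rs : List α)
    (hl : ∀ y ∈ ls, key y ≤ key x) (hr : ∀ y ∈ rs, key x < key y) :
    PySem.List.insertBy (fun a b => decide (key a < key b)) x (ls ++ rs) = ls ++ x :: rs := by
  rw [pv_insertBy_skip _ _ _ _ (fun y hy => by simpa using Int.not_lt.mpr (hl y hy)),
      pv_insertBy_front _ _ _ (fun y hy => by simpa using hr y hy)]

-- a stable sort by a key with values in {0,…,6} is the concatenation of its key-buckets
lemma pv_sorted_buckets {α : Type} (key : α → Int) (xs : List α)
    (h : ∀ x ∈ xs, 0 ≤ key x ∧ key x < 7) :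
    PySem.List.sorted xs key false =
      pvBk key 0 xs ++ pvBk key 1 xs ++ pvBk key 2 xs ++ pvBk key 3 xs ++
      pvBk key 4 xs ++ pvBk key 5 xs ++ pvBk key 6 xs := by
  rw [PySem.List.sorted_eq_foldl_insertBy]
  induction xs using List.reverseRecOn with
  | nil => rfl
  | append_singleton xs x ih =>
    rw [List.foldl_append, List.foldl_cons, List.foldl_nil,
        ih (fun y hy => h y (by simp [hy]))]
    have hx := h x (by simp)
    have hcase : key x = 0 ∨ key x = 1 ∨ key x = 2 ∨ key x = 3 ∨ key x = 4 ∨ key x = 5 ∨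
        key x = 6 := by omega
    simp only [pvBk_append_singleton]
    rcases hcase with hj | hj | hj | hj | hj | hj | hj <;> simp only [hj] <;> norm_num
    · have e := pv_insert_at key x (pvBk key 0 xs)
        (pvBk key 1 xs ++ pvBk key 2 xs ++ pvBk key 3 xs ++ pvBk key 4 xs ++ pvBk key 5 xs ++
         pvBk key 6 xs)
        (fun y hy => by have := pv_mem_bk hy; omega)
        (fun y hy => by
          simp only [List.mem_append] at hy
          rcases hy with ((((hy | hy) | hy) | hy) | hy) | hy <;> have := pv_mem_bk hy <;> omega)
      simpa [List.append_assoc, hj] using e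
    · have e := pv_insert_at key x (pvBk key 0 xs ++ pvBk key 1 xs)
        (pvBk key 2 xs ++ pvBk key 3 xs ++ pvBk key 4 xs ++ pvBk key 5 xs ++ pvBk key 6 xs)
        (fun y hy => by
          simp only [List.mem_append] at hy
          rcases hy with hy | hy <;> have := pv_mem_bk hy <;> omega)
        (fun y hy => by
          simp only [List.mem_append] at hy
          rcases hy with (((hy | hy) | hy) | hy) | hy <;> have := pv_mem_bk hy <;> omega)
      simpa [List.append_assoc, hj] using e
    · have e := pv_insert_at key x (pvBk key 0 xs ++ pvBk key 1 xs ++ pvBk key 2 xs)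
        (pvBk key 3 xs ++ pvBk key 4 xs ++ pvBk key 5 xs ++ pvBk key 6 xs)
        (fun y hy => by
          simp only [List.mem_append] at hy
          rcases hy with (hy | hy) | hy <;> have := pv_mem_bk hy <;> omega)
        (fun y hy => by
          simp only [List.mem_append] at hy
          rcases hy with ((hy | hy) | hy) | hy <;> have := pv_mem_bk hy <;> omega)
      simpa [List.append_assoc, hj] using e
    · have e := pv_insert_at key x
        (pvBk key 0 xs ++ pvBk key 1 xs ++ pvBk key 2 xs ++ pvBk key 3 xs)
        (pvBk key 4 xs ++ pvBk key 5 xs ++ pvBk key 6 xs)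
        (fun y hy => by
          simp only [List.mem_append] at hy
          rcases hy with ((hy | hy) | hy) | hy <;> have := pv_mem_bk hy <;> omega)
        (fun y hy => by
          simp only [List.mem_append] at hy
          rcases hy with (hy | hy) | hy <;> have := pv_mem_bk hy <;> omega)
      simpa [List.append_assoc, hj] using e
    · have e := pv_insert_at key x
        (pvBk key 0 xs ++ pvBk key 1 xs ++ pvBk key 2 xs ++ pvBk key 3 xs ++ pvBk key 4 xs)
        (pvBk key 5 xs ++ pvBk key 6 xs)
        (fun y hy => by
          simp only [List.mem_append] at hy
          rcases hy with (((hy | hy) | hy) | hy) | hy <;> have := pv_mem_bk hy <;> omega)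
        (fun y hy => by
          simp only [List.mem_append] at hy
          rcases hy with hy | hy <;> have := pv_mem_bk hy <;> omega)
      simpa [List.append_assoc, hj] using e
    · have e := pv_insert_at key x
        (pvBk key 0 xs ++ pvBk key 1 xs ++ pvBk key 2 xs ++ pvBk key 3 xs ++ pvBk key 4 xs ++
         pvBk key 5 xs)
        (pvBk key 6 xs)
        (fun y hy => by
          simp only [List.mem_append] at hy
          rcases hy with ((((hy | hy) | hy) | hy) | hy) | hy <;> have := pv_mem_bk hy <;> omega)
        (fun y hy => by have := pv_mem_bk hy; omega)
      simpa [List.append_assoc, hj] using e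
    · have e := pv_insert_at key x
        (pvBk key 0 xs ++ pvBk key 1 xs ++ pvBk key 2 xs ++ pvBk key 3 xs ++ pvBk key 4 xs ++
         pvBk key 5 xs ++ pvBk key 6 xs)
        ([] : List α)
        (fun y hy => by
          simp only [List.mem_append] at hy
          rcases hy with (((((hy | hy) | hy) | hy) | hy) | hy) | hy <;> have := pv_mem_bk hy <;>
            omega)
        (fun y hy => by simp at hy)
      simpa [List.append_assoc, hj] using e

-- A's per-tag lookup equals the flattened filter (unique keys)
lemma pv_dict_filter (sections : List (String × List String)) (t : String)
    (h : (sections.map Prod.fst).Nodup) :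
    pvFlat t sections = ((PySem.Dict.mk sections).get? t).getD [] := by
  induction sections with
  | nil => simp [pvFlat, PySem.Dict.get?]
  | cons kv rest ih =>
    obtain ⟨k, v⟩ := kv
    rw [List.map_cons, List.nodup_cons] at h
    by_cases hk : k = t
    · have hrest : rest.filter (fun p => p.1 == t) = [] := by
        rw [List.filter_eq_nil_iff]
        intro p hp hbeq
        rw [beq_iff_eq] at hbeq
        exact h.1 (by rw [hk]; exact List.mem_map.mpr ⟨p, hp, hbeq⟩)
      simp [pvFlat, List.filter_cons, hk, hrest, PySem.Dict.get?_mk_cons]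
    · have hb : (k == t) = false := beq_eq_false_iff_ne.mpr hk
      have := ih h.2
      simp only [pvFlat, List.filter_cons] at this ⊢
      rw [PySem.Dict.get?_mk_cons]
      simp [hb, this]

lemma pv_step (sections : List (String × List String)) (t : String)
    (h : (sections.map Prod.fst).Nodup) (acc : List String) :
    (match (PySem.Dict.mk sections).get? t with
     | some sec => if sec ≠ [] then acc ++ sec else acc
     | none => acc) = acc ++ pvFlat t sections := by
  rw [pv_dict_filter sections t h]
  cases hg : (PySem.Dict.mk sections).get? t with
  | none => simp
  | some s => by_cases hs : s = [] <;> simp [hs]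

lemma pv_loop1 (sections : List (String × List String))
    (h : (sections.map Prod.fst).Nodup) (tags : List String) (acc : List String) :
    tags.foldl (fun acc tag =>
      match (PySem.Dict.mk sections).get? tag with
      | some sec => if sec ≠ [] then acc ++ sec else acc
      | none => acc) acc = acc ++ tags.flatMap (fun t => pvFlat t sections) := by
  induction tags generalizing acc with
  | nil => simp
  | cons t tags ih =>
    rw [List.foldl_cons, ih, pv_step sections t h acc]
    simp

lemma pv_loop2 (l : List (String × List String)) (init : List String) :
    l.foldl (fun acc kv => if kv.1 ∈ pvPrioTags then acc else acc ++ kv.2) init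
      = init ++ (l.filter (fun kv => !decide (kv.1 ∈ pvPrioTags))).flatMap (fun kv => kv.2) := by
  induction l generalizing init with
  | nil => simp
  | cons kv l ih =>
    rw [List.foldl_cons, ih]
    by_cases hk : kv.1 ∈ pvPrioTags <;> simp [hk]

lemma pvRank_eq : pvRank = ⟨[("qq_context", 0), ("history_context", 1), ("history", 2),
    ("current_message_layers", 3), ("user_state", 4), ("retrieval_knowledge", 5)]⟩ := by
  decide

lemma pv_key_eq (s : String) :
    pvRank.getD s 6 =
      (if s = "qq_context" then 0 else if s = "history_context" then 1 else
       if s = "history" then 2 else if s = "current_message_layers" then 3 else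
       if s = "user_state" then 4 else if s = "retrieval_knowledge" then 5 else (6 : Int)) := by
  have ne : ∀ a : String, ¬s = a → (a == s) = false :=
    fun a h => beq_eq_false_iff_ne.mpr (fun e => h e.symm)
  rw [pvRank_eq]
  simp only [PySem.Dict.getD, PySem.Dict.get?, List.find?_cons, List.find?_nil]
  split_ifs with h1 h2 h3 h4 h5 h6
  · simp [h1]
  · simp [ne _ h1, h2]
  · simp [ne _ h1, ne _ h2, h3]
  · simp [ne _ h1, ne _ h2, ne _ h3, h4]
  · simp [ne _ h1, ne _ h2, ne _ h3, ne _ h4, h5]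
  · simp [ne _ h1, ne _ h2, ne _ h3, ne _ h4, ne _ h5, h6]
  · simp [ne _ h1, ne _ h2, ne _ h3, ne _ h4, ne _ h5, ne _ h6]

lemma pv_key_bounds (kv : String × List String) :
    0 ≤ pvRank.getD kv.1 6 ∧ pvRank.getD kv.1 6 < 7 := by
  rw [pv_key_eq]; split_ifs <;> omega

lemma pvBk_eq_prio (sections : List (String × List String)) :
    (pvBk (fun kv => pvRank.getD kv.1 6) 0 sections
        = sections.filter (fun kv => kv.1 == "qq_context")) ∧
    (pvBk (fun kv => pvRank.getD kv.1 6) 1 sections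
        = sections.filter (fun kv => kv.1 == "history_context")) ∧
    (pvBk (fun kv => pvRank.getD kv.1 6) 2 sections
        = sections.filter (fun kv => kv.1 == "history")) ∧
    (pvBk (fun kv => pvRank.getD kv.1 6) 3 sections
        = sections.filter (fun kv => kv.1 == "current_message_layers")) ∧
    (pvBk (fun kv => pvRank.getD kv.1 6) 4 sections
        = sections.filter (fun kv => kv.1 == "user_state")) ∧
    (pvBk (fun kv => pvRank.getD kv.1 6) 5 sections
        = sections.filter (fun kv => kv.1 == "retrieval_knowledge")) ∧
    (pvBk (fun kv => pvRank.getD kv.1 6) 6 sections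
        = sections.filter (fun kv => !decide (kv.1 ∈ pvPrioTags))) := by
  refine ⟨?_, ?_, ?_, ?_, ?_, ?_, ?_⟩ <;>
    · refine List.filter_congr (fun kv _ => ?_)
      dsimp only
      rw [pv_key_eq kv.1]
      split_ifs <;> simp_all [beq_eq_false_iff_ne, pvPrioTags]

-- ===== VERDICT (by name: the statement is the Claim_ definition above) =====
theorem compose_sections_py_spec : Claim_equal_compose_sections_py := by
  intro sections _hdom hpre
  simp only [Spec_compose_sections_py, compose_sections_py, compose_sections_py_alt]
  rw [pv_loop1 sections hpre pvPrioTags [], pv_loop2,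
      pv_sorted_buckets _ _ (fun kv _ => pv_key_bounds kv)]
  simp only [PySem.List.foldl_append_eq_flatMap]
  obtain ⟨e0, e1, e2, e3, e4, e5, e6⟩ := pvBk_eq_prio sections
  rw [e0, e1, e2, e3, e4, e5, e6]
  simp [pvFlat, pvPrioTags, List.flatMap_append, List.append_assoc]
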